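-- pv_equiv track=rewrite | github.com/sonofstrange/Metro-Map-Generator | RU/main.py | calculate_metro_path
-- ===== SOURCE A (Python) =====
-- def calculate_metro_path(points):
--     """Строит путь между станциями с углами строго 45 градусов, гарантированно проходя через все точки"""
--     if len(points) < 2:
--         return points
--
--     path = [points[0]]
--
--     for i in range(1, len(points)):
--         prev_x, prev_y = path[-1]
--         curr_x, curr_y = points[i]
--
--         dx = curr_x - prev_x
--         dy = curr_y - prev_y
--
--         # Определяем основные направления движения
--         if dx == 0:  # Вертикальное движение
--             path.append((prev_x, curr_y))
--         elif dy == 0:  # Горизонтальное движение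
--             path.append((curr_x, prev_y))
--         else:
--             # Движение под углом 45 градусов
--             distance = min(abs(dx), abs(dy))
--             step_x = distance if dx > 0 else -distance
--             step_y = distance if dy > 0 else -distance
--
--             # Промежуточная точка
--             mid_x = prev_x + step_x
--             mid_y = prev_y + step_y
--
--             # Проверяем, не проходим ли мы уже через целевую точку
--             if (abs(mid_x - curr_x) < 1 and abs(mid_y - curr_y) < 1):
--                 path.append((curr_x, curr_y))
--             else:
--                 path.append((mid_x, mid_y))
--
--                 # Добираемся до конечной точки
--                 if mid_x != curr_x:
--                     path.append((curr_x, mid_y))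
--                 if mid_y != curr_y:
--                     path.append((curr_x, curr_y))
--
--     # Оптимизация: удаляем лишние точки на одной прямой
--     optimized_path = [path[0]]
--     for i in range(1, len(path) - 1):
--         x0, y0 = optimized_path[-1]
--         x1, y1 = path[i]
--         x2, y2 = path[i + 1]
--
--         # Если три точки лежат на одной прямой, среднюю можно удалить
--         if (x1 - x0) * (y2 - y0) != (x2 - x0) * (y1 - y0):
--             optimized_path.append((x1, y1))
--
--     optimized_path.append(path[-1])
--     return optimized_path
-- ===== SOURCE B (Python) =====
-- def calculate_metro_path(points):
--     """Single-pass rebuild: emit 0-1 bend points + the target per segment, smoothing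
--     collinear middles on the fly (one pop per appended point)."""
--     if len(points) < 2:
--         return points
--     out = [points[0]]
--
--     def add(p):
--         if len(out) >= 2:
--             x0, y0 = out[-2]
--             x1, y1 = out[-1]
--             if (x1 - x0) * (p[1] - y0) == (p[0] - x0) * (y1 - y0):
--                 out.pop()
--         out.append(p)
--
--     for (px, py), (cx, cy) in zip(points, points[1:]):
--         dx = cx - px
--         dy = cy - py
--         if dx != 0 and dy != 0 and abs(dx) != abs(dy):
--             d = min(abs(dx), abs(dy))
--             add((px + (d if dx > 0 else -d), py + (d if dy > 0 else -d)))
--         add((cx, cy))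
--     return out
-- ===== Notes on version B (the rewrite author's own statement) =====
-- stated objective: simpler
-- what changed: Fused A's two phases (build full bend path, then a separate collinearity-pruning scan plus unconditional final append) into one pass over consecutive input points that emits at most one bend point plus the target per segment (the 1-3 appends and the <1 tolerance collapse to this on integer inputs) and prunes a collinear middle on the fly with one conditional pop before each append.
import Mathlib
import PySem

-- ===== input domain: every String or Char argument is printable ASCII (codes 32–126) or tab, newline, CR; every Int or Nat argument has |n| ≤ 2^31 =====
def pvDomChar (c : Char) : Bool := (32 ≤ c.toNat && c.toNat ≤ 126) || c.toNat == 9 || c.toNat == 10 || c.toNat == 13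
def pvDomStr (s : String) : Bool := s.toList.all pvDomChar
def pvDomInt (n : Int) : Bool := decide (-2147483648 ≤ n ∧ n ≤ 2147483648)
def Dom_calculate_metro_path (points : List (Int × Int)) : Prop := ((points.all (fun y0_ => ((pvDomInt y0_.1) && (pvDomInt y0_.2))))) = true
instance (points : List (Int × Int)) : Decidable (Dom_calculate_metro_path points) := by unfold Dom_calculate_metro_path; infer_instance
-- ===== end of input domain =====

-- B fuses A's two phases into one pass over consecutive input points, emitting at most one
-- bend point plus the target per segment and removing collinear middles on the fly (simpler).

-- ===== PORT A =====
-- phase-1 loop body: `for i in range(1, len(points))` reading points[i] is ported as a fold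
-- over points.tail; `path[-1]` is path.getLastD (path is never empty).
def pvStepA (path : List (Int × Int)) (curr : Int × Int) : List (Int × Int) :=
  let prev := path.getLastD (0, 0)
  let dx := curr.1 - prev.1
  let dy := curr.2 - prev.2
  if dx = 0 then path ++ [(prev.1, curr.2)]
  else if dy = 0 then path ++ [(curr.1, prev.2)]
  else
    let distance := min |dx| |dy|
    let step_x := if dx > 0 then distance else -distance
    let step_y := if dy > 0 then distance else -distance
    let mid_x := prev.1 + step_x
    let mid_y := prev.2 + step_y
    if |mid_x - curr.1| < 1 ∧ |mid_y - curr.2| < 1 then path ++ [curr]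
    else
      let path1 := path ++ [(mid_x, mid_y)]
      let path2 := if mid_x ≠ curr.1 then path1 ++ [(curr.1, mid_y)] else path1
      if mid_y ≠ curr.2 then path2 ++ [curr] else path2

-- phase-2 loop body: `for i in range(1, len(path)-1)` reading path[i], path[i+1] is ported as
-- a fold over the list of those (path[i], path[i+1]) pairs; `optimized_path[-1]` is getLastD.
def pvStepOpt (opt : List (Int × Int)) (pq : (Int × Int) × (Int × Int)) : List (Int × Int) :=
  let x0 := (opt.getLastD (0, 0)).1
  let y0 := (opt.getLastD (0, 0)).2
  let x1 := pq.1.1; let y1 := pq.1.2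
  let x2 := pq.2.1; let y2 := pq.2.2
  if (x1 - x0) * (y2 - y0) ≠ (x2 - x0) * (y1 - y0) then opt ++ [(x1, y1)] else opt

def calculate_metro_path (points : List (Int × Int)) : List (Int × Int) :=
  if points.length < 2 then points
  else
    let path := points.tail.foldl pvStepA [points.headD (0, 0)]
    let opt := ((path.drop 1).zip (path.drop 2)).foldl pvStepOpt [path.headD (0, 0)]
    opt ++ [path.getLastD (0, 0)]

-- ===== PORT B =====
-- Source B's add(p): pop out[-1] if collinear with out[-2] and p, then append p.
def pvSmoothAdd (out : List (Int × Int)) (p : Int × Int) : List (Int × Int) :=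
  if 2 ≤ out.length ∧
      ((out.getLastD (0, 0)).1 - (out.dropLast.getLastD (0, 0)).1)
        * (p.2 - (out.dropLast.getLastD (0, 0)).2)
      = (p.1 - (out.dropLast.getLastD (0, 0)).1)
        * ((out.getLastD (0, 0)).2 - (out.dropLast.getLastD (0, 0)).2)
  then out.dropLast ++ [p]
  else out ++ [p]

-- Source B's loop body over a zipped pair of consecutive input points.
def pvSegB (out : List (Int × Int)) (pc : (Int × Int) × (Int × Int)) : List (Int × Int) :=
  let px := pc.1.1; let py := pc.1.2
  let cx := pc.2.1; let cy := pc.2.2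
  let dx := cx - px
  let dy := cy - py
  if dx ≠ 0 ∧ dy ≠ 0 ∧ |dx| ≠ |dy| then
    let d := min |dx| |dy|
    let out1 := pvSmoothAdd out (px + (if dx > 0 then d else -d), py + (if dy > 0 then d else -d))
    pvSmoothAdd out1 (cx, cy)
  else pvSmoothAdd out (cx, cy)

def calculate_metro_path_alt (points : List (Int × Int)) : List (Int × Int) :=
  if points.length < 2 then points
  else (points.zip points.tail).foldl pvSegB [points.headD (0, 0)]

-- ===== PRECONDITION & SPEC =====
def Spec_calculate_metro_path (points : List (Int × Int)) (out : List (Int × Int)) : Prop := out = calculate_metro_path_alt points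
instance (points : List (Int × Int)) (out : List (Int × Int)) : Decidable (Spec_calculate_metro_path points out) := by unfold Spec_calculate_metro_path; infer_instance

-- ===== CLAIM (what is proved, stated in full; the proofs are below) =====
def Claim_equal_calculate_metro_path : Prop := ∀ (points : List (Int × Int)), Dom_calculate_metro_path points → Spec_calculate_metro_path points (calculate_metro_path points)

-- ===== LEMMAS AND PROOFS =====

-- the per-segment point emission both programs produce (0/1 bend point + the target)
def pvEmit (p c : Int × Int) : List (Int × Int) :=
  let dx := c.1 - p.1
  let dy := c.2 - p.2
  if dx ≠ 0 ∧ dy ≠ 0 ∧ |dx| ≠ |dy| then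
    let d := min |dx| |dy|
    [(p.1 + (if dx > 0 then d else -d), p.2 + (if dy > 0 then d else -d)), c]
  else [c]

theorem pvEmit_ne_nil (p c : Int × Int) : pvEmit p c ≠ [] := by
  unfold pvEmit; dsimp only; split <;> simp

theorem pvEmit_getLastD (p c : Int × Int) (d : Int × Int) :
    (pvEmit p c).getLastD d = c := by
  unfold pvEmit; dsimp only; split <;> simp

theorem pvGetLastD_irrel {α : Type} (l : List α) (h : l ≠ []) (d1 d2 : α) :
    l.getLastD d1 = l.getLastD d2 := by
  cases l with
  | nil => exact absurd rfl h
  | cons a t => rw [List.getLastD_cons, List.getLastD_cons]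

theorem pvGetLastD_append {α : Type} (l l' : List α) (h : l' ≠ []) (d : α) :
    (l ++ l').getLastD d = l'.getLastD d := by
  induction l with
  | nil => rfl
  | cons a t ih =>
    rw [List.cons_append, List.getLastD_cons,
      pvGetLastD_irrel (t ++ l') (fun he => h (List.append_eq_nil_iff.mp he).2) a d, ih]

-- A's phase-1 step appends exactly the emission for (last point of path, curr)
theorem pvStepA_eq (path : List (Int × Int)) (c : Int × Int) :
    pvStepA path c = path ++ pvEmit (path.getLastD (0, 0)) c := by
  unfold pvStepA pvEmit
  dsimp only
  obtain ⟨cx, cy⟩ := c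
  generalize path.getLastD (0, 0) = pr
  obtain ⟨px, py⟩ := pr
  dsimp only
  split_ifs <;>
    simp only [Int.abs_eq_natAbs, List.append_assoc, List.cons_append, List.nil_append,
      List.append_cancel_left_eq, List.cons_eq_cons, Prod.mk.injEq, and_true, true_and] at * <;>
    first
      | rfl
      | omega

-- phase 1 unrolled: the path is the seed plus the per-segment emissions, flattened
theorem pvPhase1_eq (rest : List (Int × Int)) (acc : List (Int × Int)) :
    rest.foldl pvStepA acc
      = acc ++ ((acc.getLastD (0, 0) :: rest).zip rest).flatMap (fun pc => pvEmit pc.1 pc.2) := by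
  induction rest generalizing acc with
  | nil => simp
  | cons c rest ih =>
    rw [List.foldl_cons, ih (pvStepA acc c), pvStepA_eq]
    rw [pvGetLastD_append _ _ (pvEmit_ne_nil _ _), pvEmit_getLastD]
    simp [List.zip_cons_cons]

-- B's segment step = folding the smoothing add over the emission
theorem pvSegB_eq (out : List (Int × Int)) (pc : (Int × Int) × (Int × Int)) :
    pvSegB out pc = (pvEmit pc.1 pc.2).foldl pvSmoothAdd out := by
  unfold pvSegB pvEmit
  dsimp only
  split <;> rfl

theorem pvStepOpt_ne_nil (opt : List (Int × Int)) (pq : (Int × Int) × (Int × Int))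
    (h : opt ≠ []) : pvStepOpt opt pq ≠ [] := by
  unfold pvStepOpt; dsimp only; split
  · simp
  · exact h

-- B's smoothing add on a state ending in a = A's keep-or-drop step, then append
theorem pvSmoothAdd_concat (opt : List (Int × Int)) (a b : Int × Int) (h : opt ≠ []) :
    pvSmoothAdd (opt ++ [a]) b = pvStepOpt opt (a, b) ++ [b] := by
  unfold pvSmoothAdd pvStepOpt
  dsimp only
  rw [List.getLastD_concat, List.dropLast_concat]
  have hlen : 2 ≤ (opt ++ [a]).length := by
    cases opt with
    | nil => exact absurd rfl h
    | cons x t => simp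
  by_cases hc : (a.1 - (opt.getLastD (0, 0)).1) * (b.2 - (opt.getLastD (0, 0)).2)
      = (b.1 - (opt.getLastD (0, 0)).1) * (a.2 - (opt.getLastD (0, 0)).2)
  · rw [if_pos ⟨hlen, hc⟩, if_neg (fun hne => hne hc)]
  · rw [if_neg (fun hand => hc hand.2), if_pos hc]

-- the fused smoothing fold equals A's phase-2 loop plus the unconditional final append
theorem pvPhase2_eq (t : List (Int × Int)) (opt : List (Int × Int)) (a : Int × Int)
    (h : opt ≠ []) :
    ((a :: t).zip t).foldl pvStepOpt opt ++ [(a :: t).getLastD (0, 0)]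
      = t.foldl pvSmoothAdd (opt ++ [a]) := by
  induction t generalizing opt a with
  | nil => simp
  | cons b t ih =>
    rw [List.zip_cons_cons, List.foldl_cons, List.foldl_cons,
      show (a :: b :: t).getLastD (0, 0) = (b :: t).getLastD (0, 0) by
        rw [List.getLastD_cons]; exact pvGetLastD_irrel _ (by simp) _ _,
      ih (pvStepOpt opt (a, b)) b (pvStepOpt_ne_nil _ _ h),
      pvSmoothAdd_concat opt a b h]

-- ===== VERDICT (by name: the statement is the Claim_ definition above) =====
theorem calculate_metro_path_spec : Claim_equal_calculate_metro_path := by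
  intro points _
  unfold Spec_calculate_metro_path calculate_metro_path calculate_metro_path_alt
  by_cases h : points.length < 2
  · simp [h]
  · simp only [h, if_false]
    cases points with
    | nil => simp at h
    | cons p0 rest =>
      cases rest with
      | nil => simp at h
      | cons p1 rest' =>
        -- phase 1: the built path is p0 :: (flattened emissions)
        rw [show (p0 :: p1 :: rest').tail = p1 :: rest' from rfl,
          show (p0 :: p1 :: rest').headD (0, 0) = p0 from rfl,
          pvPhase1_eq]
        rw [show ([p0].getLastD (0, 0)) = p0 from rfl]
        -- B's fold = smoothing fold over the same flattened emissions
        rw [show pvSegB = fun out pc => (pvEmit pc.1 pc.2).foldl pvSmoothAdd out from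
          funext fun out => funext fun pc => pvSegB_eq out pc]
        rw [show ((p0 :: p1 :: rest').zip (p1 :: rest')).foldl
              (fun out pc => (pvEmit pc.1 pc.2).foldl pvSmoothAdd out) [p0]
            = (((p0 :: p1 :: rest').zip (p1 :: rest')).flatMap
                (fun pc => pvEmit pc.1 pc.2)).foldl pvSmoothAdd [p0] by
          rw [List.flatMap_def, List.foldl_flatten, List.foldl_map]]
        -- name the flattened emission list and split off its head
        rcases hT : ((p0 :: p1 :: rest').zip (p1 :: rest')).flatMap
            (fun pc => pvEmit pc.1 pc.2) with _ | ⟨a, T'⟩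
        · rw [List.zip_cons_cons, List.flatMap_cons] at hT
          exact absurd (List.append_eq_nil_iff.mp hT).1 (pvEmit_ne_nil p0 p1)
        · -- phase 2 + final append = smoothing fold, via pvPhase2_eq
          rw [hT]
          rw [show [p0] ++ a :: T' = p0 :: a :: T' from rfl,
            show (p0 :: a :: T').drop 1 = a :: T' from rfl,
            show (p0 :: a :: T').drop 2 = T' from rfl,
            show (p0 :: a :: T').headD (0, 0) = p0 from rfl,
            show (p0 :: a :: T').getLastD (0, 0) = (a :: T').getLastD (0, 0) by
              rw [List.getLastD_cons]; exact pvGetLastD_irrel _ (by simp) _ _,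
            pvPhase2_eq T' [p0] a (by simp)]
          rfl
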